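-- pv_equiv track=rewrite | github.com/Kristian-Karlic/MassSpectrum-Analyzer | GUI.py | _format_neutral_loss_label
-- ===== SOURCE A (Python) =====
-- def _format_neutral_loss_label(raw: str) -> str:
--     """
--     Convert tokens like 'y-H2O' -> 'y–H₂O' using Unicode subscripts
--     """
--     parts = raw.split('-', 1)
--     if len(parts) == 2:
--         ion, loss = parts[0], parts[1]
--     else:
--         ion, loss = raw, ''
--
--     def unicode_subscript(text: str) -> str:
--         """Convert numbers to Unicode subscript"""
--         subscript_map = {
--             '0': '₀', '1': '₁', '2': '₂', '3': '₃', '4': '₄',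
--             '5': '₅', '6': '₆', '7': '₇', '8': '₈', '9': '₉'
--         }
--         result = text
--         for digit, sub in subscript_map.items():
--             result = result.replace(digit, sub)
--         return result
--
--     # Use en dash (–) instead of hyphen (-)
--     if loss:
--         return f'{ion}–{unicode_subscript(loss)}'
--     return ion
-- ===== SOURCE B (Python) =====
-- def _format_neutral_loss_label(raw: str) -> str:
--     """
--     Convert tokens like 'y-H2O' -> 'y–H₂O' using Unicode subscripts.
--     Single character-by-character pass with a dict lookup instead of
--     ten whole-string .replace passes.
--     """
--     subs = {
--         '0': '₀', '1': '₁', '2': '₂', '3': '₃', '4': '₄',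
--         '5': '₅', '6': '₆', '7': '₇', '8': '₈', '9': '₉'
--     }
--     parts = raw.split('-', 1)
--     if len(parts) == 2 and parts[1]:
--         return parts[0] + '–' + ''.join(subs.get(c, c) for c in parts[1])
--     return parts[0]
-- ===== Notes on version B (the rewrite author's own statement) =====
-- stated objective: idiomatic
-- what changed: The ten sequential whole-string replace passes of the subscript helper are replaced by a single character-by-character pass over the loss string with a dict lookup (subs.get(c, c)), and the ion/loss unpacking collapses into one guard returning parts[0] otherwise.
import Mathlib
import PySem

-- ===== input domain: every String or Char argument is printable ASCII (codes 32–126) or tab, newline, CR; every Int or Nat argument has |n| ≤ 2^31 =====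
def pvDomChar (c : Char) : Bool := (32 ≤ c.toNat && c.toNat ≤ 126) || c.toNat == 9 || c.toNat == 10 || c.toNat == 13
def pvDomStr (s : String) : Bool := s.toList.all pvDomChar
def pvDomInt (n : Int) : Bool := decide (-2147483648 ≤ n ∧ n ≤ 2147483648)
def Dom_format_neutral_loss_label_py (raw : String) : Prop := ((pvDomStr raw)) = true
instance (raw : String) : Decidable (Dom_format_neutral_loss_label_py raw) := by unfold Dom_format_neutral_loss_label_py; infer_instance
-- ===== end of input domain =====

-- B formats the neutral-loss label with one character-by-character subscript-lookup pass
-- instead of A's ten sequential whole-string replace passes (idiomatic rewrite; return values proved equal).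


-- ===== PORT A =====
-- A's subscript_map dict, in insertion order
def pvSubscriptMap : List (String × String) :=
  [("0", "₀"), ("1", "₁"), ("2", "₂"), ("3", "₃"), ("4", "₄"),
   ("5", "₅"), ("6", "₆"), ("7", "₇"), ("8", "₈"), ("9", "₉")]

-- A's unicode_subscript: result = text; for digit, sub in subscript_map.items(): result = result.replace(digit, sub)
def pvUnicodeSubscript (text : String) : String :=
  pvSubscriptMap.foldl (fun result p => PySem.Str.replace result p.1 p.2) text

def format_neutral_loss_label_py (raw : String) : String :=
  let parts := (PySem.Str.splitMax? raw "-" 1).getD []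
  let ion := if parts.length = 2 then parts.getD 0 "" else raw
  let loss := if parts.length = 2 then parts.getD 1 "" else ""
  if loss ≠ "" then ion ++ "–" ++ pvUnicodeSubscript loss else ion

-- ===== PORT B =====
-- B's subs dict
def pvSubs : PySem.Dict Char Char :=
  PySem.Dict.ofList
    [('0', '₀'), ('1', '₁'), ('2', '₂'), ('3', '₃'), ('4', '₄'),
     ('5', '₅'), ('6', '₆'), ('7', '₇'), ('8', '₈'), ('9', '₉')]

def format_neutral_loss_label_py_alt (raw : String) : String :=
  let parts := (PySem.Str.splitMax? raw "-" 1).getD []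
  if parts.length = 2 ∧ parts.getD 1 "" ≠ "" then
    parts.getD 0 "" ++ "–" ++
      String.ofList ((parts.getD 1 "").toList.map (fun c => pvSubs.getD c c))
  else parts.getD 0 ""

-- ===== PRECONDITION & SPEC =====
def Spec_format_neutral_loss_label_py (raw : String) (out : String) : Prop := out = format_neutral_loss_label_py_alt raw
instance (raw : String) (out : String) : Decidable (Spec_format_neutral_loss_label_py raw out) := by unfold Spec_format_neutral_loss_label_py; infer_instance

-- ===== CLAIM (what is proved, stated in full; the proofs are below) =====
def Claim_equal_format_neutral_loss_label_py : Prop := ∀ (raw : String), Dom_format_neutral_loss_label_py raw → Spec_format_neutral_loss_label_py raw (format_neutral_loss_label_py raw)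

-- ===== LEMMAS AND PROOFS =====

-- str.replace with a single-character pattern and replacement is a per-character map
theorem pvReplaceGo_single (d sd : Char) :
    ∀ (fuel : Nat) (l acc : List Char), l.length ≤ fuel →
      PySem.Chars.replace.go [d] [sd] fuel l acc =
        acc.reverse ++ l.map (fun c => if c = d then sd else c) := by
  intro fuel
  induction fuel with
  | zero =>
    intro l acc h
    have hl : l = [] := List.eq_nil_of_length_eq_zero (Nat.le_zero.mp h)
    subst hl
    simp [PySem.Chars.replace.go]
  | succ n ih =>
    intro l acc h
    cases l with
    | nil => simp [PySem.Chars.replace.go]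
    | cons c t =>
      rw [PySem.Chars.replace.go]
      by_cases hc : c = d
      · subst hc
        simp only [List.isPrefixOf, BEq.rfl, Bool.and_eq_true]
        rw [ih _ _ (by simpa using Nat.le_of_succ_le_succ h)]
        simp
      · have hp : [d].isPrefixOf (c :: t) = false := by
          simp [List.isPrefixOf]
          exact fun hh => hc (by simpa using hh.symm)
        rw [hp]
        simp only [if_neg Bool.false_ne_true]
        rw [ih _ _ (by simpa using Nat.le_of_succ_le_succ h)]
        simp [hc]

theorem pvReplace_single (cs : List Char) (d sd : Char) :
    PySem.Chars.replace cs [d] [sd] = cs.map (fun c => if c = d then sd else c) := by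
  rw [PySem.Chars.replace]
  simp only [List.isEmpty]
  simpa using pvReplaceGo_single d sd cs.length cs [] (le_refl _)

-- split(sep, maxsplit): with maxsplit = 0 the loop is terminal
theorem pvSplitGo_zero (sep : List Char) (fuel : Nat) (l cur : List Char) (acc : List (List Char)) :
    PySem.Chars.splitOnMax.go sep fuel 0 l cur acc = ((cur.reverse ++ l) :: acc).reverse := by
  cases fuel with
  | zero => rw [PySem.Chars.splitOnMax.go]
  | succ n =>
    cases l with
    | nil => rw [PySem.Chars.splitOnMax.go]; simp; omega
    | cons c t => rw [PySem.Chars.splitOnMax.go]; simp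

-- characterisation of raw.split('-', 1) at the character level
theorem pvSplitGo_one (fuel : Nat) :
    ∀ (l cur : List Char) (acc : List (List Char)), l.length ≤ fuel →
      PySem.Chars.splitOnMax.go ['-'] fuel 1 l cur acc =
        acc.reverse ++ (if '-' ∈ l then
          [cur.reverse ++ l.takeWhile (· ≠ '-'), (l.dropWhile (· ≠ '-')).drop 1]
        else [cur.reverse ++ l]) := by
  induction fuel with
  | zero =>
    intro l cur acc h
    have hl : l = [] := List.eq_nil_of_length_eq_zero (Nat.le_zero.mp h)
    subst hl
    rw [PySem.Chars.splitOnMax.go]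
    simp
  | succ n ih =>
    intro l cur acc h
    cases l with
    | nil => rw [PySem.Chars.splitOnMax.go]; simp; omega
    | cons c t =>
      rw [PySem.Chars.splitOnMax.go]
      by_cases hc : c = '-'
      · subst hc
        simp only [List.isPrefixOf, BEq.rfl, Bool.and_eq_true, List.isPrefixOf_nil_left]
        rw [pvSplitGo_zero]
        simp [List.takeWhile, List.dropWhile]
      · have hp : (['-'] : List Char).isPrefixOf (c :: t) = false := by
          simp [List.isPrefixOf]
          exact fun hh => hc (by simpa using hh.symm)
        rw [hp]
        simp only [if_neg Bool.false_ne_true, if_neg (by omega : ¬ (1 : Nat) = 0)]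
        rw [ih _ _ _ (by simpa using Nat.le_of_succ_le_succ h)]
        by_cases hm : '-' ∈ t
        · simp [hm, hc, Ne.symm hc, List.takeWhile, List.dropWhile]
        · simp [hm, hc, Ne.symm hc, List.takeWhile, List.dropWhile]

theorem pvSplit_char (s : List Char) :
    PySem.Chars.splitOnMax s ['-'] 1 =
      if '-' ∈ s then
        [s.takeWhile (· ≠ '-'), (s.dropWhile (· ≠ '-')).drop 1]
      else [s] := by
  rw [PySem.Chars.splitOnMax]
  norm_num
  rw [pvSplitGo_one (s.length + 1) s [] [] (by omega)]
  simp

-- the ten composed single-digit substitutions equal the dict lookup, pointwise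
theorem pvPointwise (c : Char) :
    ((fun c => if c = '9' then '₉' else c) ∘ (fun c => if c = '8' then '₈' else c) ∘ (fun c => if c = '7' then '₇' else c) ∘ (fun c => if c = '6' then '₆' else c) ∘ (fun c => if c = '5' then '₅' else c) ∘ (fun c => if c = '4' then '₄' else c) ∘ (fun c => if c = '3' then '₃' else c) ∘ (fun c => if c = '2' then '₂' else c) ∘ (fun c => if c = '1' then '₁' else c) ∘ (fun c => if c = '0' then '₀' else c)) c = pvSubs.getD c c := by
  by_cases h0 : c = '0'
  · subst h0; decide
  by_cases h1 : c = '1'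
  · subst h1; decide
  by_cases h2 : c = '2'
  · subst h2; decide
  by_cases h3 : c = '3'
  · subst h3; decide
  by_cases h4 : c = '4'
  · subst h4; decide
  by_cases h5 : c = '5'
  · subst h5; decide
  by_cases h6 : c = '6'
  · subst h6; decide
  by_cases h7 : c = '7'
  · subst h7; decide
  by_cases h8 : c = '8'
  · subst h8; decide
  by_cases h9 : c = '9'
  · subst h9; decide
  have k0 : ¬ ('0' : Char) = c := fun h => h0 h.symm
  have k1 : ¬ ('1' : Char) = c := fun h => h1 h.symm
  have k2 : ¬ ('2' : Char) = c := fun h => h2 h.symm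
  have k3 : ¬ ('3' : Char) = c := fun h => h3 h.symm
  have k4 : ¬ ('4' : Char) = c := fun h => h4 h.symm
  have k5 : ¬ ('5' : Char) = c := fun h => h5 h.symm
  have k6 : ¬ ('6' : Char) = c := fun h => h6 h.symm
  have k7 : ¬ ('7' : Char) = c := fun h => h7 h.symm
  have k8 : ¬ ('8' : Char) = c := fun h => h8 h.symm
  have k9 : ¬ ('9' : Char) = c := fun h => h9 h.symm
  have hit : pvSubs.items = [('0', '₀'), ('1', '₁'), ('2', '₂'), ('3', '₃'), ('4', '₄'),
     ('5', '₅'), ('6', '₆'), ('7', '₇'), ('8', '₈'), ('9', '₉')] := rfl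
  simp [Function.comp, h0,h1,h2,h3,h4,h5,h6,h7,h8,h9, k0,k1,k2,k3,k4,k5,k6,k7,k8,k9, PySem.Dict.getD, PySem.Dict.get?, hit, beq_iff_eq]

-- A's unicode_subscript equals B's one-pass translation
theorem pvSub_eq (text : String) :
    pvUnicodeSubscript text = String.ofList (text.toList.map (fun c => pvSubs.getD c c)) := by
  apply String.toList_injective
  simp only [pvUnicodeSubscript, pvSubscriptMap, List.foldl_cons, List.foldl_nil]
  simp only [PySem.Str.toList_replace]
  have hd0 : ("0" : String).toList = ['0'] := rfl
  have hs0 : ("₀" : String).toList = ['₀'] := rfl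
  have hd1 : ("1" : String).toList = ['1'] := rfl
  have hs1 : ("₁" : String).toList = ['₁'] := rfl
  have hd2 : ("2" : String).toList = ['2'] := rfl
  have hs2 : ("₂" : String).toList = ['₂'] := rfl
  have hd3 : ("3" : String).toList = ['3'] := rfl
  have hs3 : ("₃" : String).toList = ['₃'] := rfl
  have hd4 : ("4" : String).toList = ['4'] := rfl
  have hs4 : ("₄" : String).toList = ['₄'] := rfl
  have hd5 : ("5" : String).toList = ['5'] := rfl
  have hs5 : ("₅" : String).toList = ['₅'] := rfl
  have hd6 : ("6" : String).toList = ['6'] := rfl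
  have hs6 : ("₆" : String).toList = ['₆'] := rfl
  have hd7 : ("7" : String).toList = ['7'] := rfl
  have hs7 : ("₇" : String).toList = ['₇'] := rfl
  have hd8 : ("8" : String).toList = ['8'] := rfl
  have hs8 : ("₈" : String).toList = ['₈'] := rfl
  have hd9 : ("9" : String).toList = ['9'] := rfl
  have hs9 : ("₉" : String).toList = ['₉'] := rfl
  simp only [hd0,hs0,hd1,hs1,hd2,hs2,hd3,hs3,hd4,hs4,hd5,hs5,hd6,hs6,hd7,hs7,hd8,hs8,hd9,hs9]
  simp only [pvReplace_single, List.map_map, String.toList_ofList]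
  exact List.map_congr_left (fun c _ => pvPointwise c)

-- the split both ports perform, at the String level
theorem pvSplit_str (raw : String) :
    PySem.Str.splitMax? raw "-" 1 =
      some (if '-' ∈ raw.toList then
        [String.ofList (raw.toList.takeWhile (· ≠ '-')),
         String.ofList ((raw.toList.dropWhile (· ≠ '-')).drop 1)]
      else [raw]) := by
  rw [PySem.Str.splitMax?]
  rw [show ("-" : String).toList = ['-'] from rfl]
  rw [PySem.Chars.splitMax?]
  simp only [List.isEmpty]
  rw [pvSplit_char]
  by_cases h : '-' ∈ raw.toList <;> simp [h]

-- ===== VERDICT (by name: the statement is the Claim_ definition above) =====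
theorem format_neutral_loss_label_py_spec : Claim_equal_format_neutral_loss_label_py := by
  intro raw _
  unfold Spec_format_neutral_loss_label_py format_neutral_loss_label_py format_neutral_loss_label_py_alt
  rw [pvSplit_str]
  by_cases hm : '-' ∈ raw.toList
  · simp [hm, pvSub_eq]
  · simp [hm]
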